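-- pv_equiv track=rewrite | github.com/JaspervdA/adventofcode | day12_try2.py | getFeasibleSpringGroups
-- ===== SOURCE A (Python) =====
-- def springGroupIsFeasible(group, spring_counts):
--     length_needed = sum(spring_counts) + len(spring_counts) - 1
--     if length_needed > len(group):
--         return False
--     else:
--         return True
--
-- def getFeasibleSpringGroups(group, current_spring_counts):
--     # Dummy data in comments for this example "..???.??.? 1,1,1"
--     # getFeasibleSpring Groups returns an array of arrays of feasible spring counts and corresponding next_spring_counts
--     # For instance [[1,1],[1]] and [[1],[1,1]] on loop 1
--     # Deze functie nog fixen, dan zou het moeten werken (na hoop debuggen waarschijnlijk...)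
--
--     # Begin bij [] als feasible_spring counts en schuif de andere door
--     num_spring_counts = len(current_spring_counts)
--     feasible_spring_counts = []
--     new_spring_counts = []
--     for i in range(num_spring_counts + 1):
--         test_spring_counts = current_spring_counts[0:i]
--         next_spring_counts = current_spring_counts[i:]
--         if springGroupIsFeasible(group, test_spring_counts):
--             feasible_spring_counts.append(test_spring_counts)
--             new_spring_counts.append(next_spring_counts)
--     return feasible_spring_counts, new_spring_counts
-- ===== SOURCE B (Python) =====
-- def getFeasibleSpringGroups(group, current_spring_counts):
--     # One pass of running prefix sums, then build both result lists from the
--     # feasible split indices.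
--     limit = len(group) + 1
--     sums = [0]
--     for c in current_spring_counts:
--         sums.append(sums[-1] + c)
--     ok = [i for i, s in enumerate(sums) if s + i <= limit]
--     return ([current_spring_counts[:i] for i in ok],
--             [current_spring_counts[i:] for i in ok])
-- ===== Notes on version B (the rewrite author's own statement) =====
-- stated objective: alternative
-- what changed: Replaces the loop that re-sums each prefix slice and tests it through a helper with a single running-prefix-sum pass that collects the feasible split indices, from which both result lists are built by comprehensions.
import Mathlib
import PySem

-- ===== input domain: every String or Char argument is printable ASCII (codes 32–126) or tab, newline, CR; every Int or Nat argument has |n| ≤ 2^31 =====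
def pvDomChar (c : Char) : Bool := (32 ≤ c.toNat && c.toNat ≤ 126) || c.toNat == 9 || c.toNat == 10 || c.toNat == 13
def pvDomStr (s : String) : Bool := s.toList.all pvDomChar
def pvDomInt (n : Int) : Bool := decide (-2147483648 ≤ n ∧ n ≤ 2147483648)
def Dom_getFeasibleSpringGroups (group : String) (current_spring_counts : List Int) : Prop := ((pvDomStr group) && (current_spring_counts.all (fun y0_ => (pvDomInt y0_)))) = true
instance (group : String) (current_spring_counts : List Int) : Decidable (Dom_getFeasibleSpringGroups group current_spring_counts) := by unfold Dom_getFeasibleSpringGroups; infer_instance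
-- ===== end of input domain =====

-- B replaces A's per-prefix re-summing (via the helper) by one running-prefix-sum pass
-- that collects the feasible split indices, then builds both lists from those indices.

-- ===== PORT A =====
def springGroupIsFeasible (group : String) (spring_counts : List Int) : Bool :=
  let length_needed : Int := spring_counts.sum + spring_counts.length - 1
  if length_needed > PySem.Str.len group then false else true

def getFeasibleSpringGroups (group : String) (current_spring_counts : List Int) : List (List Int) × List (List Int) :=
  let num_spring_counts := current_spring_counts.length
  (PySem.List.pyRange 0 ((num_spring_counts : Int) + 1)).foldl
    (fun acc i =>
      let test_spring_counts := PySem.List.slice current_spring_counts (some 0) (some i)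
      let next_spring_counts := PySem.List.slice current_spring_counts (some i) none
      if springGroupIsFeasible group test_spring_counts then
        (acc.1 ++ [test_spring_counts], acc.2 ++ [next_spring_counts])
      else acc)
    ([], [])

-- ===== PORT B =====
def getFeasibleSpringGroups_alt (group : String) (current_spring_counts : List Int) : List (List Int) × List (List Int) :=
  let limit : Int := PySem.Str.len group + 1
  let sums : List Int :=
    current_spring_counts.foldl (fun acc c => acc ++ [PySem.List.pyGetD acc (-1) 0 + c]) [0]
  let ok : List Int :=
    ((PySem.List.enumerate sums).filter (fun p => p.2 + p.1 ≤ limit)).map (fun p => p.1)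
  (ok.map (fun i => PySem.List.slice current_spring_counts (some 0) (some i)),
   ok.map (fun i => PySem.List.slice current_spring_counts (some i) none))

-- ===== PRECONDITION & SPEC =====
def Spec_getFeasibleSpringGroups (group : String) (current_spring_counts : List Int) (out : List (List Int) × List (List Int)) : Prop := out = getFeasibleSpringGroups_alt group current_spring_counts
instance (group : String) (current_spring_counts : List Int) (out : List (List Int) × List (List Int)) : Decidable (Spec_getFeasibleSpringGroups group current_spring_counts out) := by unfold Spec_getFeasibleSpringGroups; infer_instance

-- ===== CLAIM (what is proved, stated in full; the proofs are below) =====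
def Claim_equal_getFeasibleSpringGroups : Prop := ∀ (group : String) (current_spring_counts : List Int), Dom_getFeasibleSpringGroups group current_spring_counts → Spec_getFeasibleSpringGroups group current_spring_counts (getFeasibleSpringGroups group current_spring_counts)

-- ===== LEMMAS AND PROOFS =====

-- A's loop: appending to both components under one condition is a filter+map.
theorem foldl_pair_append {α β γ : Type} (p : α → Bool) (f : α → β) (g : α → γ) :
    ∀ (is : List α) (as : List β) (bs : List γ),
      is.foldl (fun acc i => if p i then (acc.1 ++ [f i], acc.2 ++ [g i]) else acc) (as, bs)
        = (as ++ (is.filter p).map f, bs ++ (is.filter p).map g) := by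
  intro is
  induction is with
  | nil => intro as bs; simp
  | cons i t ih =>
      intro as bs
      by_cases h : p i <;> simp [List.foldl_cons, h, ih]

-- the prefix-sum tails produced by B's loop
def psums (s : Int) : List Int → List Int
  | [] => []
  | c :: t => (s + c) :: psums (s + c) t

theorem foldl_sums_eq (xs : List Int) :
    ∀ (acc : List Int) (s : Int),
      xs.foldl (fun acc c => acc ++ [PySem.List.pyGetD acc (-1) 0 + c]) (acc ++ [s])
        = acc ++ [s] ++ psums s xs := by
  induction xs with
  | nil => intro acc s; simp [psums]
  | cons c t ih =>
      intro acc s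
      have h := ih (acc ++ [s]) (s + c)
      simp only [List.foldl_cons, PySem.List.pyGetD_neg_one_append_singleton] at *
      simpa [psums, List.append_assoc] using h

theorem psums_eq_map (xs : List Int) :
    ∀ s : Int, psums s xs = (List.range xs.length).map (fun k => s + (xs.take (k+1)).sum) := by
  induction xs with
  | nil => intro s; simp [psums]
  | cons c t ih =>
      intro s
      simp [psums, List.range_succ_eq_map, ih (s + c), List.map_map, Function.comp_def,
        List.take_succ_cons, add_assoc]

theorem sums_eq_map (xs : List Int) :
    xs.foldl (fun acc c => acc ++ [PySem.List.pyGetD acc (-1) 0 + c]) [0]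
      = (List.range (xs.length + 1)).map (fun k => (xs.take k).sum) := by
  have h := foldl_sums_eq xs [] 0
  simp only [List.nil_append] at h
  rw [h, psums_eq_map, List.range_succ_eq_map]
  simp [List.map_map, Function.comp_def]

theorem enumerate_map_range {α : Type} (g : Nat → α) :
    ∀ (m : Nat) (s : Int),
      PySem.List.enumerate ((List.range m).map g) s
        = (List.range m).map (fun k : Nat => ((s + (k : Int), g k) : Int × α)) := by
  intro m
  induction m with
  | zero => intro s; simp [PySem.List.enumerate_nil]
  | succ m ih =>
      intro s
      simp [List.range_succ, PySem.List.enumerate_append, ih s]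

theorem getFeasibleSpringGroups_spec' (group : String) (xs : List Int) :
    getFeasibleSpringGroups group xs = getFeasibleSpringGroups_alt group xs := by
  have hcond : ∀ k ∈ List.range (xs.length + 1),
      springGroupIsFeasible group (List.take k xs)
        = decide ((List.take k xs).sum + (k : Int) ≤ PySem.Str.len group + 1) := by
    intro k hk
    rw [List.mem_range] at hk
    have hklen : ((List.take k xs).length : Int) = (k : Int) := by
      rw [List.length_take]; push_cast; omega
    simp only [springGroupIsFeasible]
    rw [hklen]
    rcases lt_or_ge (PySem.Str.len group) ((List.take k xs).sum + (k : Int) - 1) with h | h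
    · rw [if_pos h]
      symm
      simp only [decide_eq_false_iff_not]
      omega
    · rw [if_neg (by omega)]
      symm
      simp only [decide_eq_true_eq]
      omega
  have hA : getFeasibleSpringGroups group xs =
      ((((List.range (xs.length + 1)).filter
          (fun k => springGroupIsFeasible group (List.take k xs))).map (fun k => List.take k xs)),
       (((List.range (xs.length + 1)).filter
          (fun k => springGroupIsFeasible group (List.take k xs))).map (fun k => List.drop k xs))) := by
    show (PySem.List.pyRange 0 ((xs.length : Int) + 1)).foldl
        (fun acc i =>
          if springGroupIsFeasible group (PySem.List.slice xs (some 0) (some i)) then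
            (acc.1 ++ [PySem.List.slice xs (some 0) (some i)],
             acc.2 ++ [PySem.List.slice xs (some i) none])
          else acc) ([], []) = _
    rw [show ((xs.length : Int) + 1) = ((xs.length + 1 : Nat) : Int) by push_cast; ring,
      PySem.List.pyRange_zero_natCast,
      foldl_pair_append (fun i => springGroupIsFeasible group (PySem.List.slice xs (some 0) (some i)))
        (fun i => PySem.List.slice xs (some 0) (some i))
        (fun i => PySem.List.slice xs (some i) none)]
    simp only [List.nil_append, List.filter_map, List.map_map, Function.comp_def,
      PySem.List.slice_zero_start, PySem.List.slice_to_natCast, PySem.List.slice_from_natCast]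
  have hB : getFeasibleSpringGroups_alt group xs =
      ((((List.range (xs.length + 1)).filter
          (fun k => decide ((List.take k xs).sum + (k : Int) ≤ PySem.Str.len group + 1))).map
            (fun k => List.take k xs)),
       (((List.range (xs.length + 1)).filter
          (fun k => decide ((List.take k xs).sum + (k : Int) ≤ PySem.Str.len group + 1))).map
            (fun k => List.drop k xs))) := by
    show ((((PySem.List.enumerate
          (xs.foldl (fun acc c => acc ++ [PySem.List.pyGetD acc (-1) 0 + c]) [0])).filter
            (fun p => decide (p.2 + p.1 ≤ PySem.Str.len group + 1))).map (fun p => p.1)).map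
              (fun i => PySem.List.slice xs (some 0) (some i)),
          ((((PySem.List.enumerate
            (xs.foldl (fun acc c => acc ++ [PySem.List.pyGetD acc (-1) 0 + c]) [0])).filter
              (fun p => decide (p.2 + p.1 ≤ PySem.Str.len group + 1))).map (fun p => p.1)).map
                (fun i => PySem.List.slice xs (some i) none))) = _
    rw [sums_eq_map, enumerate_map_range]
    simp only [List.filter_map, List.map_map, Function.comp_def, zero_add,
      PySem.List.slice_zero_start, PySem.List.slice_to_natCast, PySem.List.slice_from_natCast]
  rw [hA, hB, List.filter_congr hcond]

-- ===== VERDICT (by name: the statement is the Claim_ definition above) =====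
theorem getFeasibleSpringGroups_spec : Claim_equal_getFeasibleSpringGroups := by
  intro group xs _
  exact getFeasibleSpringGroups_spec' group xs
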